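-- pv_equiv track=rewrite | github.com/BBuf/how-to-optim-algorithm-in-cuda | meagtron-lm/playground.py | generate_context_parallel_groups
-- ===== SOURCE A (Python) =====
-- def generate_context_parallel_groups(world_size, context_parallel_size, tensor_model_parallel_size, pipeline_model_parallel_size):
--     """
--     Generate context parallel groups based on context parallel size, considering tensor and pipeline model parallel sizes.
--     """
--     assert world_size % (context_parallel_size * tensor_model_parallel_size * pipeline_model_parallel_size) == 0, "world_size must be divisible by the product of context_parallel_size, tensor_model_parallel_size, and pipeline_model_parallel_size"
--     data_parallel_size = world_size // (tensor_model_parallel_size * pipeline_model_parallel_size * context_parallel_size)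
--     context_parallel_group_ranks = []
--     num_pipeline_model_parallel_groups: int = world_size // pipeline_model_parallel_size
--
--     for i in range(pipeline_model_parallel_size):
--         for j in range(data_parallel_size):
--             start_rank = (
--                 i * num_pipeline_model_parallel_groups
--                 + j * tensor_model_parallel_size * context_parallel_size
--             )
--             end_rank = (
--                 i * num_pipeline_model_parallel_groups
--                 + (j + 1) * tensor_model_parallel_size * context_parallel_size
--             )
--             for k in range(tensor_model_parallel_size):
--                 ranks = range(start_rank + k, end_rank, tensor_model_parallel_size)
--                 context_parallel_group_ranks.append(list(ranks))
--     return context_parallel_group_ranks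
-- ===== SOURCE B (Python) =====
-- def generate_context_parallel_groups(world_size, context_parallel_size, tensor_model_parallel_size, pipeline_model_parallel_size):
--     """
--     Generate context parallel groups based on context parallel size, considering tensor and pipeline model parallel sizes.
--     """
--     assert world_size % (context_parallel_size * tensor_model_parallel_size * pipeline_model_parallel_size) == 0, "world_size must be divisible by the product of context_parallel_size, tensor_model_parallel_size, and pipeline_model_parallel_size"
--     num_pipeline_model_parallel_groups = world_size // pipeline_model_parallel_size
--     tc = tensor_model_parallel_size * context_parallel_size
--
--     def key(r):
--         i, local = divmod(r, num_pipeline_model_parallel_groups)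
--         return (i, local // tc, (local % tc) % tensor_model_parallel_size)
--
--     # stage 1: tag every rank with its (pipeline, data, tensor) coordinates
--     pairs = [(key(r), r) for r in range(world_size)]
--     # stage 2: group ranks by coordinate; ranks arrive in increasing order, and
--     # coordinates first appear in (i, j, k) nesting order, so the buckets come out
--     # exactly as A's nested loops emit them
--     buckets = {}
--     for kk, r in pairs:
--         buckets[kk] = buckets.get(kk, []) + [r]
--     return list(buckets.values())
-- ===== Notes on version B (the rewrite author's own statement) =====
-- stated objective: alternative
-- what changed: Instead of three nested loops emitting strided ranges, B makes one flat pass that tags every rank with its decoded (pipeline, data, tensor) coordinates and a second grouping pass over a dict of buckets keyed by those coordinates, returning the bucket lists.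
-- outside the precondition, e.g. on generate_context_parallel_groups(4, 1, -1, 1): A returns [], B returns [[0], [1], [2], [3]]; on generate_context_parallel_groups(-4, -1, 1, 1): A returns [[], [], [], []], B returns []
import Mathlib
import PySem

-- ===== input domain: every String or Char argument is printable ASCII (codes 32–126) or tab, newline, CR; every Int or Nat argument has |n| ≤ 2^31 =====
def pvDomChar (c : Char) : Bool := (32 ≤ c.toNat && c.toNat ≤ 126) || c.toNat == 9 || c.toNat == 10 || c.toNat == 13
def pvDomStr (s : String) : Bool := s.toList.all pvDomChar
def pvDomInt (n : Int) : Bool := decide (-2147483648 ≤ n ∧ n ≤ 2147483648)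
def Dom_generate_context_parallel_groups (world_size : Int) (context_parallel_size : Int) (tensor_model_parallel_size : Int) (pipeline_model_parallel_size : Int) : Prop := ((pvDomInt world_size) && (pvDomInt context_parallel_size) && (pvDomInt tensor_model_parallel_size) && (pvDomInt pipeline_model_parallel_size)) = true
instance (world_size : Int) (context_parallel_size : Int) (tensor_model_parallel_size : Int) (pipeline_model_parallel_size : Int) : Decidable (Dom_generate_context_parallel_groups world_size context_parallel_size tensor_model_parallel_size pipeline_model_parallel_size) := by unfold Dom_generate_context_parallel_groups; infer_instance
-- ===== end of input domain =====

-- B replaces A's nested (pipeline, data, tensor) loops building strided ranges by a flat scan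
-- over all ranks that buckets each rank into a dict keyed by its decoded coordinates and
-- returns the bucket lists (alternative decomposition, same asymptotic cost).


-- ===== PORT A =====
def generate_context_parallel_groups (world_size : Int) (context_parallel_size : Int) (tensor_model_parallel_size : Int) (pipeline_model_parallel_size : Int) : List (List Int) :=
  let data_parallel_size := PySem.Int.floordiv world_size (tensor_model_parallel_size * pipeline_model_parallel_size * context_parallel_size)
  let num_pipeline_model_parallel_groups := PySem.Int.floordiv world_size pipeline_model_parallel_size
  (PySem.List.pyRange 0 pipeline_model_parallel_size 1).foldl (fun acc i =>
    (PySem.List.pyRange 0 data_parallel_size 1).foldl (fun acc j =>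
      let start_rank := i * num_pipeline_model_parallel_groups + j * tensor_model_parallel_size * context_parallel_size
      let end_rank := i * num_pipeline_model_parallel_groups + (j + 1) * tensor_model_parallel_size * context_parallel_size
      (PySem.List.pyRange 0 tensor_model_parallel_size 1).foldl (fun acc k =>
        acc ++ [PySem.List.pyRange (start_rank + k) end_rank tensor_model_parallel_size]) acc) acc) []

-- ===== PORT B =====
def generate_context_parallel_groups_alt (world_size : Int) (context_parallel_size : Int) (tensor_model_parallel_size : Int) (pipeline_model_parallel_size : Int) : List (List Int) :=
  let num_pipeline_model_parallel_groups := PySem.Int.floordiv world_size pipeline_model_parallel_size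
  let tc := tensor_model_parallel_size * context_parallel_size
  let key : Int → Int × Int × Int := fun r =>
    let i := PySem.Int.floordiv r num_pipeline_model_parallel_groups
    let local_ := PySem.Int.mod r num_pipeline_model_parallel_groups
    (i, PySem.Int.floordiv local_ tc, PySem.Int.mod (PySem.Int.mod local_ tc) tensor_model_parallel_size)
  let pairs := (PySem.List.pyRange 0 world_size 1).map (fun r => (key r, r))
  let buckets := pairs.foldl (fun d pr => d.insert pr.1 (d.getD pr.1 [] ++ [pr.2]))
    (PySem.Dict.empty : PySem.Dict (Int × Int × Int) (List Int))
  buckets.values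

-- ===== PRECONDITION & SPEC =====
-- Pre_ excludes inputs where A raises (zero size product in '%', or the failed divisibility
-- assert), and the degenerate inputs with a nonpositive parallel size or negative world size
-- where A's output (empty list, or a list of empty groups) is an accident of Python's empty
-- loop/strided ranges that B's scan over the ranks does not reproduce.
def Pre_generate_context_parallel_groups (world_size : Int) (context_parallel_size : Int) (tensor_model_parallel_size : Int) (pipeline_model_parallel_size : Int) : Prop :=
  PySem.Int.mod world_size (context_parallel_size * tensor_model_parallel_size * pipeline_model_parallel_size) = 0 ∧
  context_parallel_size * tensor_model_parallel_size * pipeline_model_parallel_size ≠ 0 ∧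
  ((1 ≤ context_parallel_size ∧ 1 ≤ tensor_model_parallel_size ∧ 1 ≤ pipeline_model_parallel_size) ∨
   (world_size ≤ 0 ∧
     (0 < context_parallel_size * tensor_model_parallel_size * pipeline_model_parallel_size ∨
      tensor_model_parallel_size ≤ 0 ∨ pipeline_model_parallel_size ≤ 0 ∨ world_size = 0)))
instance (world_size : Int) (context_parallel_size : Int) (tensor_model_parallel_size : Int) (pipeline_model_parallel_size : Int) : Decidable (Pre_generate_context_parallel_groups world_size context_parallel_size tensor_model_parallel_size pipeline_model_parallel_size) := by unfold Pre_generate_context_parallel_groups; infer_instance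

def pvWitness_generate_context_parallel_groups : Int × Int × Int × Int := (8, 2, 2, 2)

def Spec_generate_context_parallel_groups (world_size : Int) (context_parallel_size : Int) (tensor_model_parallel_size : Int) (pipeline_model_parallel_size : Int) (out : List (List Int)) : Prop := out = generate_context_parallel_groups_alt world_size context_parallel_size tensor_model_parallel_size pipeline_model_parallel_size
instance (world_size : Int) (context_parallel_size : Int) (tensor_model_parallel_size : Int) (pipeline_model_parallel_size : Int) (out : List (List Int)) : Decidable (Spec_generate_context_parallel_groups world_size context_parallel_size tensor_model_parallel_size pipeline_model_parallel_size out) := by unfold Spec_generate_context_parallel_groups; infer_instance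

-- ===== CLAIM (what is proved, stated in full; the proofs are below) =====
def Claim_equal_generate_context_parallel_groups : Prop := ∀ (world_size : Int) (context_parallel_size : Int) (tensor_model_parallel_size : Int) (pipeline_model_parallel_size : Int), Dom_generate_context_parallel_groups world_size context_parallel_size tensor_model_parallel_size pipeline_model_parallel_size → Pre_generate_context_parallel_groups world_size context_parallel_size tensor_model_parallel_size pipeline_model_parallel_size → Spec_generate_context_parallel_groups world_size context_parallel_size tensor_model_parallel_size pipeline_model_parallel_size (generate_context_parallel_groups world_size context_parallel_size tensor_model_parallel_size pipeline_model_parallel_size)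

-- ===== LEMMAS AND PROOFS =====

-- splitting a flat range into an outer/inner product of ranges
theorem range_mul_map_eq_flatMap {β : Type} (m n : Nat) (f : Nat → β) :
    (List.range (m * n)).map f
      = (List.range m).flatMap (fun i => (List.range n).map (fun j => f (i * n + j))) := by
  induction m with
  | zero => simp
  | succ m ih =>
    have h : (m + 1) * n = m * n + n := by ring
    rw [h, List.range_add, List.map_append, ih, List.range_succ, List.flatMap_append]
    simp [List.map_map, Function.comp]

theorem decode_fst (i r n : Int) (hn : 0 < n) (hr0 : 0 ≤ r) (hr : r < n) :
    PySem.Int.floordiv (i * n + r) n = i := by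
  rw [PySem.Int.floordiv_eq_iff_of_pos hn]
  constructor <;> nlinarith

theorem decode_snd (i r n : Int) (hn : 0 < n) (hr0 : 0 ≤ r) (hr : r < n) :
    PySem.Int.mod (i * n + r) n = r := by
  have h := PySem.Int.floordiv_mul_add_mod (i * n + r) n
  rw [decode_fst i r n hn hr0 hr] at h
  omega

-- the strided range A builds is a closed-form map over range
theorem strided_range_eq (s k t c : Int) (ht : 1 ≤ t) (hk0 : 0 ≤ k) (hk : k < t) :
    PySem.List.pyRange (s + k) (s + t * c) t
      = (List.range c.toNat).map (fun cc : Nat => s + k + t * (cc : Int)) := by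
  rw [PySem.List.pyRange_of_pos _ _ (by omega : (0:Int) < t)]
  by_cases hc : 1 ≤ c
  · have hlt : s + k < s + t * c := by nlinarith
    rw [if_pos hlt]
    have hN : (s + t * c - (s + k) + t - 1) / t = c := by
      rw [show s + t * c - (s + k) + t - 1 = (t - 1 - k) + c * t by ring,
          Int.add_mul_ediv_right _ _ (show t ≠ 0 by omega),
          Int.ediv_eq_zero_of_lt (by omega) (by omega)]
      omega
    rw [hN]
  · have htc : t * c ≤ 0 := by nlinarith
    rw [if_neg (by omega)]
    rw [show c.toNat = 0 by omega]

-- generic list helpers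
theorem flatMap_congr' {α β : Type} (l : List α) (f g : α → List β)
    (h : ∀ a ∈ l, f a = g a) : l.flatMap f = l.flatMap g := by
  induction l with
  | nil => rfl
  | cons a l ih =>
    simp only [List.flatMap_cons, h a (List.mem_cons_self), ih (fun x hx => h x (List.mem_cons_of_mem a hx))]

theorem filter_flatMap' {α β : Type} (l : List α) (f : α → List β) (p : β → Bool) :
    (l.flatMap f).filter p = l.flatMap (fun a => (f a).filter p) := by
  induction l with
  | nil => rfl
  | cons a l ih => simp [List.filter_append, ih]

theorem flatMap_singleton_eq_map {α β : Type} (l : List α) (f : α → β) :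
    l.flatMap (fun a => [f a]) = l.map f := by
  induction l with
  | nil => rfl
  | cons a l ih => simp [ih]

theorem range_filter_beq_single (n a : Nat) (h : a < n) :
    (List.range n).filter (fun x => x == a) = [a] := by
  induction n with
  | zero => omega
  | succ m ih =>
    rw [List.range_succ, List.filter_append]
    by_cases ham : a < m
    · rw [ih ham]
      have : ¬ (m == a) = true := by simp; omega
      simp [List.filter, this]
    · have ha : a = m := by omega
      subst ha
      have h1 : (List.range a).filter (fun x => x == a) = [] := by
        rw [List.filter_eq_nil_iff]
        intro x hx
        simp only [List.mem_range] at hx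
        simp; omega
      simp [h1, List.filter]

theorem flatMap_range_single {β : Type} (n a : Nat) (h : a < n) (f : Nat → List β) :
    (List.range n).flatMap (fun x => if x = a then f x else []) = f a := by
  induction n with
  | zero => omega
  | succ m ih =>
    rw [List.range_succ, List.flatMap_append]
    by_cases ham : a < m
    · rw [ih ham]
      simp only [List.flatMap_cons, List.flatMap_nil]
      rw [if_neg (by omega)]
      simp
    · have ha : a = m := by omega
      subst ha
      have h1 : (List.range a).flatMap (fun x => if x = a then f x else []) = [] := by
        rw [List.flatMap_eq_nil_iff]
        intro x hx
        simp only [List.mem_range] at hx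
        rw [if_neg (by omega)]
      simp [h1]

-- PySem.Set update helpers
theorem set_update_append {α : Type} [BEq α] (s : PySem.Set α) (l1 l2 : List α) :
    PySem.Set.update s (l1 ++ l2) = PySem.Set.update (PySem.Set.update s l1) l2 := by
  simp [PySem.Set.update]

theorem set_add_of_mem {α : Type} [BEq α] [LawfulBEq α] (s : PySem.Set α) (x : α) (h : x ∈ s) :
    PySem.Set.add s x = s := by
  simp [PySem.Set.add, PySem.Set.contains, h]

theorem set_add_of_not_mem {α : Type} [BEq α] [LawfulBEq α] (s : PySem.Set α) (x : α) (h : ¬ x ∈ s) :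
    PySem.Set.add s x = s ++ [x] := by
  simp [PySem.Set.add, PySem.Set.contains, h]

theorem mem_set_update_left {α : Type} [BEq α] [LawfulBEq α] (s : PySem.Set α) (l : List α) (x : α)
    (h : x ∈ s) : x ∈ PySem.Set.update s l := by
  induction l generalizing s with
  | nil => exact h
  | cons a l ih =>
    have : PySem.Set.update s (a :: l) = PySem.Set.update (PySem.Set.add s a) l := by
      simp [PySem.Set.update]
    rw [this]
    exact ih _ ((PySem.Set.mem_add _ _ _).2 (Or.inl h))

theorem mem_set_update_right {α : Type} [BEq α] [LawfulBEq α] (s : PySem.Set α) (l : List α) (x : α)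
    (h : x ∈ l) : x ∈ PySem.Set.update s l := by
  induction l generalizing s with
  | nil => cases h
  | cons a l ih =>
    have hc : PySem.Set.update s (a :: l) = PySem.Set.update (PySem.Set.add s a) l := by
      simp [PySem.Set.update]
    rw [hc]
    rcases List.mem_cons.1 h with rfl | hm
    · exact mem_set_update_left _ _ _ ((PySem.Set.mem_add _ _ _).2 (Or.inr rfl))
    · exact ih _ hm

theorem set_update_of_subset {α : Type} [BEq α] [LawfulBEq α] (s : PySem.Set α) (l : List α)
    (h : ∀ x ∈ l, x ∈ s) : PySem.Set.update s l = s := by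
  induction l generalizing s with
  | nil => rfl
  | cons a l ih =>
    have hc : PySem.Set.update s (a :: l) = PySem.Set.update (PySem.Set.add s a) l := by
      simp [PySem.Set.update]
    rw [hc, set_add_of_mem s a (h a (List.mem_cons_self))]
    exact ih _ (fun x hx => h x (List.mem_cons_of_mem a hx))

theorem set_update_of_disjoint {α : Type} [BEq α] [LawfulBEq α] (s : PySem.Set α) (l : List α)
    (hnd : l.Nodup) (h : ∀ x ∈ l, ¬ x ∈ s) : PySem.Set.update s l = s ++ l := by
  induction l generalizing s with
  | nil => simp [PySem.Set.update]
  | cons a l ih =>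
    have hc : PySem.Set.update s (a :: l) = PySem.Set.update (PySem.Set.add s a) l := by
      simp [PySem.Set.update]
    rw [hc, set_add_of_not_mem s a (h a (List.mem_cons_self))]
    rw [ih (s ++ [a]) (List.Nodup.of_cons hnd)]
    · simp
    · intro x hx hmem
      rcases List.mem_append.1 hmem with hs | hone
      · exact h x (List.mem_cons_of_mem a hx) hs
      · have : x = a := by simpa using hone
        subst this
        exact (List.nodup_cons.1 hnd).1 hx

theorem set_ofList_of_nodup {α : Type} [BEq α] [LawfulBEq α] (l : List α) (h : l.Nodup) :
    PySem.Set.ofList l = l := by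
  rw [PySem.Set.ofList_eq_foldl]
  have : List.foldl PySem.Set.add [] l = PySem.Set.update [] l := rfl
  rw [this, set_update_of_disjoint [] l h (by intro x _ hx; cases hx)]
  rfl

theorem set_update_flatMap_congr {α β : Type} [BEq β] [LawfulBEq β] (l : List α) (f g : α → List β)
    (h : ∀ (s : PySem.Set β), ∀ a ∈ l, PySem.Set.update s (f a) = PySem.Set.update s (g a)) :
    ∀ s : PySem.Set β, PySem.Set.update s (l.flatMap f) = PySem.Set.update s (l.flatMap g) := by
  induction l with
  | nil => intro s; rfl
  | cons a l ih =>
    intro s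
    rw [List.flatMap_cons, List.flatMap_cons, set_update_append, set_update_append,
        h s a (List.mem_cons_self)]
    exact ih (fun s' x hx => h s' x (List.mem_cons_of_mem a hx)) _

theorem set_update_repeat {β : Type} [BEq β] [LawfulBEq β] (C : Nat) (hC : 1 ≤ C) (B : List β)
    (s : PySem.Set β) :
    PySem.Set.update s ((List.range C).flatMap (fun _ => B)) = PySem.Set.update s B := by
  induction C with
  | zero => omega
  | succ m ih =>
    rcases Nat.eq_or_lt_of_le hC with h1 | h1
    · rw [← h1]
      simp only [List.range_one, List.flatMap_cons, List.flatMap_nil, List.append_nil]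
    · have hm : 1 ≤ m := by omega
      rw [List.range_succ, List.flatMap_append, set_update_append, ih hm]
      simp only [List.flatMap_cons, List.flatMap_nil, List.append_nil]
      exact set_update_of_subset _ _ (fun x hx => mem_set_update_right _ _ _ hx)

-- the expected key list is duplicate-free
theorem keys_nodup (P D T : Nat) :
    ((List.range P).flatMap (fun (i : Nat) => (List.range D).flatMap (fun (j : Nat) =>
      (List.range T).map (fun (k : Nat) => ((i : Int), (j : Int), (k : Int)))))).Nodup := by
  rw [List.nodup_flatMap]
  constructor
  · intro i _
    rw [List.nodup_flatMap]
    constructor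
    · intro j _
      refine List.Nodup.map ?_ List.nodup_range
      intro x y hxy
      simpa using hxy
    · refine List.Pairwise.imp ?_ (List.pairwise_lt_range (n := D))
      intro j j' hlt x hx hx'
      simp only [List.mem_map, List.mem_range] at hx hx'
      obtain ⟨k, _, rfl⟩ := hx
      obtain ⟨k', _, he⟩ := hx'
      have : (j' : Int) = (j : Int) := by
        have := congrArg (fun z => z.2.1) he
        simpa using this
      omega
  · refine List.Pairwise.imp ?_ (List.pairwise_lt_range (n := P))
    intro i i' hlt x hx hx'
    simp only [List.mem_flatMap, List.mem_map, List.mem_range] at hx hx'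
    obtain ⟨j, _, k, _, rfl⟩ := hx
    obtain ⟨j', _, k', _, he⟩ := hx'
    have : (i' : Int) = (i : Int) := by
      have := congrArg (fun z => z.1) he
      simpa using this
    omega

-- dedup of the C-fold repeated key list is the plain key list
theorem ofList_key_flat (P D T C : Nat) (hC : 1 ≤ C) :
    PySem.Set.ofList ((List.range P).flatMap (fun (i : Nat) => (List.range D).flatMap (fun (j : Nat) =>
        (List.range C).flatMap (fun _ => (List.range T).map (fun (k : Nat) => ((i : Int), (j : Int), (k : Int)))))))
      = (List.range P).flatMap (fun (i : Nat) => (List.range D).flatMap (fun (j : Nat) =>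
          (List.range T).map (fun (k : Nat) => ((i : Int), (j : Int), (k : Int))))) := by
  have h0 : ∀ l : List (Int × Int × Int), PySem.Set.ofList l = PySem.Set.update [] l := by
    intro l; rw [PySem.Set.ofList_eq_foldl]; rfl
  rw [h0]
  have hinner : ∀ (i : Nat) (s : PySem.Set (Int × Int × Int)),
      PySem.Set.update s ((List.range D).flatMap (fun (j : Nat) =>
        (List.range C).flatMap (fun _ => (List.range T).map (fun (k : Nat) => ((i : Int), (j : Int), (k : Int))))))
      = PySem.Set.update s ((List.range D).flatMap (fun (j : Nat) =>
        (List.range T).map (fun (k : Nat) => ((i : Int), (j : Int), (k : Int))))) := by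
    intro i s
    exact set_update_flatMap_congr (List.range D) _ _ (fun s' j _ =>
      set_update_repeat C hC ((List.range T).map (fun (k : Nat) => ((i : Int), (j : Int), (k : Int)))) s') s
  rw [set_update_flatMap_congr (List.range P) _ _ (fun s i _ => hinner i s) []]
  rw [← h0]
  exact set_ofList_of_nodup _ (keys_nodup P D T)

-- the grouping fold's values, characterised (first-appearance keys, per-key filtered ranks)
theorem bucket_values (pairs : List ((Int × Int × Int) × Int)) :
    (pairs.foldl (fun d pr => d.insert pr.1 (d.getD pr.1 [] ++ [pr.2]))
        (PySem.Dict.empty : PySem.Dict (Int × Int × Int) (List Int))).values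
      = (PySem.Set.ofList (pairs.map Prod.fst)).map
          (fun k => (pairs.filter (fun pr => pr.1 == k)).map Prod.snd) := by
  have hmod : (pairs.foldl (fun d pr => d.insert pr.1 (d.getD pr.1 [] ++ [pr.2]))
        (PySem.Dict.empty : PySem.Dict (Int × Int × Int) (List Int)))
      = pairs.foldl (fun d pr => d.modify pr.1 [] (· ++ [pr.2])) PySem.Dict.empty := rfl
  rw [hmod]
  have hnd : (pairs.foldl (fun d pr => d.modify pr.1 [] (· ++ [pr.2]))
      (PySem.Dict.empty : PySem.Dict (Int × Int × Int) (List Int))).keys.Nodup :=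
    PySem.Dict.nodup_keys_foldl_modify_key pairs Prod.fst [] (fun _ pr => (· ++ [pr.2])) _
      PySem.Dict.nodup_keys_empty
  rw [PySem.Dict.values_eq_map_keys _ hnd []]
  rw [PySem.Dict.keys_foldl_modify_key pairs Prod.fst [] (fun _ pr => (· ++ [pr.2]))]
  rw [PySem.Dict.keys_empty]
  have hupd : PySem.Set.update ([] : PySem.Set (Int × Int × Int)) (pairs.map Prod.fst)
      = PySem.Set.ofList (pairs.map Prod.fst) := by
    rw [PySem.Set.ofList_eq_foldl]; rfl
  rw [hupd]
  refine List.map_congr_left ?_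
  intro k _
  rw [PySem.Dict.getD_foldl_modify_append, PySem.Dict.getD_empty]
  rfl

-- A returns [] whenever one of its three loop ranges is empty
theorem A_empty (w c t p : Int)
    (h : p ≤ 0 ∨ t ≤ 0 ∨ PySem.Int.floordiv w (t * p * c) ≤ 0) :
    generate_context_parallel_groups w c t p = [] := by
  unfold generate_context_parallel_groups
  simp only [PySem.List.foldl_append_singleton_eq_map, PySem.List.foldl_append_eq_flatMap,
    List.nil_append]
  rcases h with h0 | h0 | h0
  · rw [PySem.List.pyRange_one_eq_nil h0]; simp
  · rw [PySem.List.pyRange_one_eq_nil h0]; simp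
  · rw [PySem.List.pyRange_one_eq_nil h0]; simp

-- floor division of a nonpositive number by a positive one is nonpositive
theorem floordiv_nonpos (a b : Int) (hb : 0 < b) (ha : a ≤ 0) : PySem.Int.floordiv a b ≤ 0 := by
  by_contra hcon
  have h1 : PySem.Int.floordiv a b = PySem.Int.floordiv a b := rfl
  obtain ⟨hle, _⟩ := (PySem.Int.floordiv_eq_iff_of_pos hb).1 h1
  nlinarith


-- decoding the flat rank back into its (i, j, k) coordinates
theorem key_decode (d t c : Int) (hd : 1 ≤ d) (ht : 1 ≤ t) (hc : 1 ≤ c)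
    (i j m k : Int) (hj0 : 0 ≤ j) (hj : j < d) (hm0 : 0 ≤ m) (hm : m < c)
    (hk0 : 0 ≤ k) (hk : k < t) :
    (PySem.Int.floordiv (i * (d * t * c) + (j * (t * c) + (m * t + k))) (d * t * c),
     PySem.Int.floordiv (PySem.Int.mod (i * (d * t * c) + (j * (t * c) + (m * t + k))) (d * t * c)) (t * c),
     PySem.Int.mod (PySem.Int.mod (PySem.Int.mod (i * (d * t * c) + (j * (t * c) + (m * t + k))) (d * t * c)) (t * c)) t)
      = (i, j, k) := by
  have htc : 0 < t * c := by nlinarith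
  have hdtc : 0 < d * t * c := by nlinarith
  have hrem0 : 0 ≤ j * (t * c) + (m * t + k) := by nlinarith
  have hremlt : j * (t * c) + (m * t + k) < d * t * c := by nlinarith
  have hin0 : 0 ≤ m * t + k := by nlinarith
  have hinlt : m * t + k < t * c := by nlinarith
  rw [decode_fst i _ _ hdtc hrem0 hremlt, decode_snd i _ _ hdtc hrem0 hremlt,
      decode_fst j _ _ htc hin0 hinlt, decode_snd j _ _ htc hin0 hinlt,
      decode_snd m k t (by omega) hk0 hk]

-- a flatMap over a range where only one index contributes
theorem flatMap_range_concentrated {β : Type} (n a : Nat) (h : a < n) (f : Nat → List β)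
    (hz : ∀ x, x < n → x ≠ a → f x = []) :
    (List.range n).flatMap f = f a := by
  refine (flatMap_congr' (List.range n) f (fun x => if x = a then f x else []) ?_).trans
    (flatMap_range_single n a h f)
  intro x hx
  by_cases hxa : x = a
  · simp [hxa]
  · simp [hxa, hz x (List.mem_range.1 hx) hxa]

theorem map_filter_range_single {β : Type} (T k0 : Nat) (hk : k0 < T) (p : Nat → Bool) (g : Nat → β)
    (hp : ∀ x, x < T → p x = (x == k0)) :
    ((List.range T).filter p).map g = [g k0] := by
  rw [List.filter_congr (fun x hx => hp x (List.mem_range.1 hx)), range_filter_beq_single T k0 hk]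
  rfl

-- the ranks filtered out of the tagged flat scan for one coordinate triple
theorem filter_pairs_eq (P D T C : Nat) (val : Nat → Nat → Nat → Nat → Int)
    (i0 j0 k0 : Nat) (hi : i0 < P) (hj : j0 < D) (hk : k0 < T) :
    ((((List.range P).flatMap (fun (i : Nat) => (List.range D).flatMap (fun (j : Nat) =>
        (List.range C).flatMap (fun (m : Nat) => (List.range T).map (fun (k : Nat) =>
          (((i : Int), (j : Int), (k : Int)), val i j m k)))))).filter
        (fun pr => pr.1 == ((i0 : Int), (j0 : Int), (k0 : Int)))).map Prod.snd)
      = (List.range C).map (fun m => val i0 j0 m k0) := by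
  simp only [filter_flatMap', List.filter_map, List.map_flatMap, List.map_map]
  refine (flatMap_range_concentrated P i0 hi _ ?_).trans ?_
  · intro x hx hxa
    simp only [List.flatMap_eq_nil_iff, List.map_eq_nil_iff, List.filter_eq_nil_iff]
    intro j _ m _ k _
    simp [Prod.ext_iff, hxa]
  · refine (flatMap_range_concentrated D j0 hj _ ?_).trans ?_
    · intro x hx hxa
      simp only [List.flatMap_eq_nil_iff, List.map_eq_nil_iff, List.filter_eq_nil_iff]
      intro m _ k _
      simp [Prod.ext_iff, hxa]
    · refine (flatMap_congr' (List.range C) _ (fun m => [val i0 j0 m k0]) ?_).trans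
        (flatMap_singleton_eq_map _ _)
      intro m _
      refine map_filter_range_single T k0 hk _ _ ?_
      intro x hx
      by_cases hxk : x = k0
      · simp [hxk]
      · simp [Prod.ext_iff, hxk]

-- ===== VERDICT (by name: the statement is the Claim_ definition above) =====
theorem generate_context_parallel_groups_spec : Claim_equal_generate_context_parallel_groups := by
  intro w c t p _ hpre
  obtain ⟨hmod, hne, hbranch⟩ := hpre
  unfold Spec_generate_context_parallel_groups
  by_cases hw : w ≤ 0
  · -- degenerate region: both programs return []
    have hB : generate_context_parallel_groups_alt w c t p = [] := by
      unfold generate_context_parallel_groups_alt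
      rw [PySem.List.pyRange_one_eq_nil hw]
      rfl
    rw [hB]
    apply A_empty
    rcases hbranch with ⟨hc1, ht1, hp1⟩ | ⟨_, hdeg⟩
    · refine Or.inr (Or.inr (floordiv_nonpos _ _ ?_ hw))
      have := mul_pos (mul_pos (show (0:Int) < t by omega) (show (0:Int) < p by omega)) (show (0:Int) < c by omega)
      linarith
    · rcases hdeg with hprod | ht0 | hp0 | hw0
      · refine Or.inr (Or.inr (floordiv_nonpos _ _ ?_ hw))
        have : t * p * c = c * t * p := by ring
        omega
      · exact Or.inr (Or.inl ht0)
      · exact Or.inl hp0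
      · refine Or.inr (Or.inr ?_)
        rw [hw0]
        simp [PySem.Int.floordiv]
  · -- main region: positive world size and positive parallel sizes
    replace hw : 0 < w := by omega
    have hcpos : 1 ≤ c ∧ 1 ≤ t ∧ 1 ≤ p := by
      rcases hbranch with h | ⟨h0, _⟩
      · exact h
      · exact absurd hw (by omega)
    obtain ⟨hc1, ht1, hp1⟩ := hcpos
    have hprodpos : 0 < c * t * p := by
      have := mul_pos (mul_pos (show (0:Int) < c by omega) (show (0:Int) < t by omega)) (show (0:Int) < p by omega)
      linarith
    have hw_eq : PySem.Int.floordiv w (c * t * p) * (c * t * p) = w := by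
      have h := PySem.Int.floordiv_mul_add_mod w (c * t * p)
      rw [hmod] at h
      omega
    set d := PySem.Int.floordiv w (c * t * p) with hdDef
    have hd1 : 1 ≤ d := by
      by_contra hcon
      have hd0 : d ≤ 0 := by omega
      nlinarith [hw_eq, hprodpos]
    have hdiveq : t * p * c = c * t * p := by ring
    have hqw : d * t * c * p = w := by rw [← hw_eq]; ring
    have hq : PySem.Int.floordiv w p = d * t * c := by
      rw [PySem.Int.floordiv_eq_iff_of_pos (by omega : (0:Int) < p)]
      exact ⟨le_of_eq hqw, by nlinarith⟩
    obtain ⟨P, hP⟩ : ∃ P : Nat, (P : Int) = p := ⟨p.toNat, Int.toNat_of_nonneg (by omega)⟩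
    obtain ⟨T, hT⟩ : ∃ T : Nat, (T : Int) = t := ⟨t.toNat, Int.toNat_of_nonneg (by omega)⟩
    obtain ⟨C, hC⟩ : ∃ C : Nat, (C : Int) = c := ⟨c.toNat, Int.toNat_of_nonneg (by omega)⟩
    obtain ⟨D, hD⟩ : ∃ D : Nat, (D : Int) = d := ⟨d.toNat, Int.toNat_of_nonneg (by omega)⟩
    have hC1 : 1 ≤ C := by omega
    have hN : ((P * (D * (C * T)) : Nat) : Int) = w := by
      push_cast
      rw [hP, hT, hC, hD]
      linear_combination hw_eq
    -- B side: unfold the lets, replace world_size // pipeline by d*t*c, characterise the fold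
    have hBdef : generate_context_parallel_groups_alt w c t p
        = (((PySem.List.pyRange 0 w 1).map (fun r =>
            ((PySem.Int.floordiv r (PySem.Int.floordiv w p),
              PySem.Int.floordiv (PySem.Int.mod r (PySem.Int.floordiv w p)) (t * c),
              PySem.Int.mod (PySem.Int.mod (PySem.Int.mod r (PySem.Int.floordiv w p)) (t * c)) t), r))).foldl
            (fun d pr => d.insert pr.1 (d.getD pr.1 [] ++ [pr.2]))
            (PySem.Dict.empty : PySem.Dict (Int × Int × Int) (List Int))).values := rfl
    rw [hBdef, hq, bucket_values]
    -- the tagged flat scan, decomposed along the (i, j, m, k) mixed radix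
    have hpairs : (PySem.List.pyRange 0 w 1).map (fun r =>
          ((PySem.Int.floordiv r (d * t * c),
            PySem.Int.floordiv (PySem.Int.mod r (d * t * c)) (t * c),
            PySem.Int.mod (PySem.Int.mod (PySem.Int.mod r (d * t * c)) (t * c)) t), r))
        = (List.range P).flatMap (fun (i : Nat) => (List.range D).flatMap (fun (j : Nat) =>
            (List.range C).flatMap (fun (m : Nat) => (List.range T).map (fun (k : Nat) =>
              (((i : Int), (j : Int), (k : Int)),
               (i : Int) * (d * t * c) + ((j : Int) * (t * c) + ((m : Int) * t + (k : Int)))))))) := by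
      rw [← hN, PySem.List.pyRange_one]
      simp only [Int.sub_zero, Int.toNat_natCast, zero_add]
      rw [List.map_map, range_mul_map_eq_flatMap P (D * (C * T))]
      refine flatMap_congr' _ _ _ ?_
      intro i hi
      rw [range_mul_map_eq_flatMap D (C * T)]
      refine flatMap_congr' _ _ _ ?_
      intro j hj
      rw [range_mul_map_eq_flatMap C T]
      refine flatMap_congr' _ _ _ ?_
      intro m hm
      refine List.map_congr_left ?_
      intro k hk
      simp only [List.mem_range] at hj hm hk
      simp only [Function.comp]
      have hcast : ((i * (D * (C * T)) + (j * (C * T) + (m * T + k)) : Nat) : Int)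
          = (i : Int) * (d * t * c) + ((j : Int) * (t * c) + ((m : Int) * t + (k : Int))) := by
        push_cast
        rw [hT, hC, hD]
        ring
      rw [hcast]
      have hkey := key_decode d t c hd1 ht1 hc1 (i : Int) (j : Int) (m : Int) (k : Int)
        (Int.natCast_nonneg j) (by rw [← hD]; exact_mod_cast hj)
        (Int.natCast_nonneg m) (by rw [← hC]; exact_mod_cast hm)
        (Int.natCast_nonneg k) (by rw [← hT]; exact_mod_cast hk)
      rw [hkey]
    rw [hpairs]
    -- the first-appearance key order is the nested (i, j, k) order
    have hkeyflat : ((List.range P).flatMap (fun (i : Nat) => (List.range D).flatMap (fun (j : Nat) =>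
            (List.range C).flatMap (fun (m : Nat) => (List.range T).map (fun (k : Nat) =>
              (((i : Int), (j : Int), (k : Int)),
               (i : Int) * (d * t * c) + ((j : Int) * (t * c) + ((m : Int) * t + (k : Int))))))))).map Prod.fst
        = (List.range P).flatMap (fun (i : Nat) => (List.range D).flatMap (fun (j : Nat) =>
            (List.range C).flatMap (fun _ => (List.range T).map (fun (k : Nat) =>
              ((i : Int), (j : Int), (k : Int)))))) := by
      simp only [List.map_flatMap, List.map_map]
      rfl
    rw [hkeyflat, ofList_key_flat P D T C hC1]
    -- A side: unfold and normalise the nested loops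
    unfold generate_context_parallel_groups
    simp only [PySem.List.foldl_append_singleton_eq_map, PySem.List.foldl_append_eq_flatMap,
      List.nil_append]
    rw [show t * p * c = c * t * p from by ring, ← hdDef, hq]
    have hrangeP : PySem.List.pyRange 0 p 1 = (List.range P).map (fun (n : Nat) => (n : Int)) := by
      rw [← hP, PySem.List.pyRange_one]
      simp
    have hrangeD : PySem.List.pyRange 0 d 1 = (List.range D).map (fun (n : Nat) => (n : Int)) := by
      rw [← hD, PySem.List.pyRange_one]
      simp
    have hrangeT : PySem.List.pyRange 0 t 1 = (List.range T).map (fun (n : Nat) => (n : Int)) := by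
      rw [← hT, PySem.List.pyRange_one]
      simp
    rw [hrangeP, hrangeD, hrangeT]
    simp only [List.flatMap_map, List.map_map, List.map_flatMap]
    refine flatMap_congr' _ _ _ ?_
    intro i hi
    refine flatMap_congr' _ _ _ ?_
    intro j hj
    refine List.map_congr_left ?_
    intro k hk
    simp only [List.mem_range] at hi hj hk
    refine Eq.trans ?_ (filter_pairs_eq P D T C
      (fun i j m k => (i : Int) * (d * t * c) + ((j : Int) * (t * c) + ((m : Int) * t + (k : Int))))
      i j k hi hj hk).symm
    simp only [Function.comp]
    rw [show (i : Int) * (d * t * c) + ((j : Int) + 1) * t * c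
        = ((i : Int) * (d * t * c) + (j : Int) * t * c) + t * c from by ring]
    rw [strided_range_eq ((i : Int) * (d * t * c) + (j : Int) * t * c) (k : Int) t c ht1
      (Int.natCast_nonneg k) (by rw [← hT]; exact_mod_cast hk)]
    rw [show c.toNat = C from by omega]
    refine List.map_congr_left ?_
    intro m _
    ring
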